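-- pv_equiv track=rewrite | github.com/jeury301/python-morsels | 3. count_words/count.py | word_cleaner
-- ===== SOURCE A (Python) =====
-- def word_cleaner(word_to_clean):
--     """Removes any punctuation from word
--
--     Args:
--         word_to_clean: Dirty word
--
--     Returns
--         A word without punctionation [a...zA...Z]
--     """
--     clean_word = ""
--
--     first = 0 # position of first word
--     last = len(word_to_clean) - 1 # position of last word
--     count = 0 # counter for current position
--     for letter in word_to_clean:
--         # checking for first or last only
--         if count == first or count == last:
--             # check if letter is within valid range AKA ignore punctuation
--             if letter > "Z" and letter < "z":
--                 # letter is valid, append to final cleaned word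
--                 clean_word+=letter
--         else:
--             # not first or last letter
--             clean_word+=letter
--         count+=1
--     return clean_word
-- ===== SOURCE B (Python) =====
-- def word_cleaner(word_to_clean):
--     """Removes punctuation from the first/last character of word (same rule as A)."""
--     n = len(word_to_clean)
--     if n == 0:
--         return ""
--     ok = lambda c: "Z" < c < "z"
--     if n == 1:
--         return word_to_clean if ok(word_to_clean) else ""
--     first = word_to_clean[0] if ok(word_to_clean[0]) else ""
--     last = word_to_clean[-1] if ok(word_to_clean[-1]) else ""
--     return first + word_to_clean[1:-1] + last
-- ===== Notes on version B (the rewrite author's own statement) =====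
-- stated objective: simpler
-- what changed: Replaces the indexed loop with a position counter by direct slicing: the interior word[1:-1] is kept verbatim and only the two endpoint characters are tested against the punctuation predicate (a single-character word is its own endpoint, tested once).
import Mathlib
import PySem

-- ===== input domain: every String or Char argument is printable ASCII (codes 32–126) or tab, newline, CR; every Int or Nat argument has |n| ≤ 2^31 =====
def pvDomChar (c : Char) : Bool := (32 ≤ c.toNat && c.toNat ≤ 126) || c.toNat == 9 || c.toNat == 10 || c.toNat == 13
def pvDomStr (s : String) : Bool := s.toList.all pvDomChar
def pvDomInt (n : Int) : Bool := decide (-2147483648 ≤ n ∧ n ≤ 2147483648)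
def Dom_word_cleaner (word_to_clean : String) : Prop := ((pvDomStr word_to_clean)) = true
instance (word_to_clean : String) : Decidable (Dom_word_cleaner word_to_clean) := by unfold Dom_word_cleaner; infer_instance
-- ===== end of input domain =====

-- B replaces A's position-counter loop with direct slicing: keep the interior verbatim,
-- filter only the two endpoint characters (objective: simpler).

-- ===== PORT A =====
-- A's loop body: state is (clean_word, count); `last` is len(word)-1.
def pvStepA (last : Int) (st : List Char × Int) (letter : Char) : List Char × Int :=
  if st.2 = 0 ∨ st.2 = last then
    if 'Z' < letter ∧ letter < 'z' then (st.1 ++ [letter], st.2 + 1) else (st.1, st.2 + 1)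
  else (st.1 ++ [letter], st.2 + 1)

def word_cleaner (word_to_clean : String) : String :=
  String.mk ((word_to_clean.toList.foldl
    (pvStepA ((word_to_clean.toList.length : Int) - 1)) ([], 0)).1)

-- ===== PORT B =====
-- `word if 'Z' < word < 'z' else ''` for a single character
def pvEndFilter (c : Char) : List Char := if 'Z' < c ∧ c < 'z' then [c] else []

def word_cleaner_alt (word_to_clean : String) : String :=
  match word_to_clean.toList with
  | [] => ""
  | [c] => String.mk (pvEndFilter c)
  | c :: d :: rest =>
      -- first-filtered ++ word[1:-1] ++ last-filtered
      String.mk (pvEndFilter c ++ (d :: rest).dropLast ++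
        ((d :: rest).getLast?.elim [] pvEndFilter))

-- ===== PRECONDITION & SPEC =====
def Spec_word_cleaner (word_to_clean : String) (out : String) : Prop := out = word_cleaner_alt word_to_clean
instance (word_to_clean : String) (out : String) : Decidable (Spec_word_cleaner word_to_clean out) := by unfold Spec_word_cleaner; infer_instance

-- ===== CLAIM (what is proved, stated in full; the proofs are below) =====
def Claim_equal_word_cleaner : Prop := ∀ (word_to_clean : String), Dom_word_cleaner word_to_clean → Spec_word_cleaner word_to_clean (word_cleaner word_to_clean)

-- ===== LEMMAS AND PROOFS =====

/-- The characters A's loop appends, starting at position `k`. -/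
def pvGA (last k : Int) : List Char → List Char
  | [] => []
  | c :: t => (if k = 0 ∨ k = last then pvEndFilter c else [c]) ++ pvGA last (k + 1) t

lemma pvFoldA (cs : List Char) (acc : List Char) (k last : Int) :
    (cs.foldl (pvStepA last) (acc, k)).1 = acc ++ pvGA last k cs := by
  induction cs generalizing acc k with
  | nil => simp [pvGA]
  | cons c t ih =>
    simp only [List.foldl, pvStepA, pvGA]
    split_ifs with h1 h2
    · simp [ih, pvEndFilter, h2]
    · simp [ih, pvEndFilter, h2]
    · simp [ih]

lemma pvGA_mid (t : List Char) (k last : Int) (hk : 1 ≤ k)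
    (hl : last = k + t.length - 1) :
    pvGA last k t = t.dropLast ++ (t.getLast?.elim [] pvEndFilter) := by
  induction t generalizing k with
  | nil => simp [pvGA]
  | cons c t' ih =>
    cases t' with
    | nil =>
      have hkl : k = last := by simp at hl; omega
      simp [pvGA, hkl]
    | cons d rest =>
      have h0 : k ≠ 0 := by omega
      have hne : k ≠ last := by simp at hl; omega
      have hrec := ih (k + 1) (by omega) (by simp at hl ⊢; omega)
      have step : pvGA last k (c :: d :: rest)
          = (if k = 0 ∨ k = last then pvEndFilter c else [c]) ++ pvGA last (k + 1) (d :: rest) := rfl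
      rw [step, hrec]
      simp [h0, hne]

-- ===== VERDICT (by name: the statement is the Claim_ definition above) =====
theorem word_cleaner_spec : Claim_equal_word_cleaner := by
  intro w _
  show word_cleaner w = word_cleaner_alt w
  unfold word_cleaner word_cleaner_alt
  generalize w.toList = cs
  match cs with
  | [] => rfl
  | [c] =>
    rw [pvFoldA]
    simp [pvGA, pvEndFilter]
  | c :: d :: rest =>
    rw [pvFoldA]
    have step : pvGA ((c :: d :: rest).length - 1) 0 (c :: d :: rest)
        = (if (0 : Int) = 0 ∨ (0 : Int) = ((c :: d :: rest).length : Int) - 1 then pvEndFilter c else [c])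
          ++ pvGA ((c :: d :: rest).length - 1) 1 (d :: rest) := rfl
    rw [step, pvGA_mid (d :: rest) 1 _ (by omega) (by simp)]
    simp
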